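-- pv_equiv track=rewrite | github.com/mrwright/z3-puzzle-solvers | tapa.py | do_groups_match_clues
-- ===== SOURCE A (Python) =====
-- def do_groups_match_clues(groups, clues):
--     """
--     Given collections of bit group sizes and clue characters respectively,
--     determines whether the groups match the clues.
--     """
--     if len(groups) != len(clues):
--         return False
--
--     clues = list(clues)
--     for group in groups:
--         group = str(group)
--         if group in clues:
--             clues.remove(group)
--         elif '?' in clues:
--             clues.remove('?')
--         else:
--             return False
--
--     return True
-- ===== SOURCE B (Python) =====
-- def do_groups_match_clues(groups, clues):
--     """
--     Aggregate re-implementation: instead of greedily removing clues per group,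
--     build count tables in one pass. An exact clue can only ever be consumed by
--     a group of that exact value, so the groups match the clues iff the lengths
--     agree and the summed deficit of exact clues is covered by the '?' wildcards.
--     """
--     clues = list(clues)
--     if len(groups) != len(clues):
--         return False
--     gstrs = [str(g) for g in groups]
--     gcount = {}
--     for s in gstrs:
--         gcount[s] = gcount.get(s, 0) + 1
--     ccount = {}
--     for c in clues:
--         ccount[c] = ccount.get(c, 0) + 1
--     needed = sum(max(0, k - ccount.get(s, 0)) for s, k in gcount.items())
--     return needed <= ccount.get('?', 0)
-- ===== Notes on version B (the rewrite author's own statement) =====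
-- stated objective: alternative
-- what changed: Replaces A's greedy per-group remove loop over a mutated clue list with one-pass count tables for groups and clues, returning True iff the summed exact-clue deficit is covered by the number of '?' wildcards.
import Mathlib
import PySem

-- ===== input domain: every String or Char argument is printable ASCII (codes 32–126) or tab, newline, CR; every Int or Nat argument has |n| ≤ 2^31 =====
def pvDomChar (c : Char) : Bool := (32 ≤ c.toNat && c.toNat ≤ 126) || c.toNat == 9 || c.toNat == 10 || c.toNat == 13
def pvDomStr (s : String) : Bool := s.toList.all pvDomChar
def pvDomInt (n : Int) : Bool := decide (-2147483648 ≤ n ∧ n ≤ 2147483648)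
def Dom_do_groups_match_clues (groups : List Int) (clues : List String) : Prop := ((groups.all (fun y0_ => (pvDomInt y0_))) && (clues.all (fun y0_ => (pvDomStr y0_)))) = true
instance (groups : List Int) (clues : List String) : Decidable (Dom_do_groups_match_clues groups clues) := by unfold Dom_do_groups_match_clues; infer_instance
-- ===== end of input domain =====

-- B replaces A's greedy per-group clue-removal loop by an aggregate count-table
-- comparison (same return value; proved equal below). Objective: alternative algorithm.

-- ===== PORT A =====
-- A's for-loop over groups, carrying the (mutated) clue list as loop state
def pvTapaLoop : List Int → List String → Bool
  | [], _ => true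
  | g :: gs, cs =>
    let s := PySem.Int.toStr g
    if s ∈ cs then pvTapaLoop gs (cs.erase s)
    else if "?" ∈ cs then pvTapaLoop gs (cs.erase "?")
    else false

def do_groups_match_clues (groups : List Int) (clues : List String) : Bool :=
  if groups.length != clues.length then false
  else pvTapaLoop groups clues

-- ===== PORT B =====
def do_groups_match_clues_alt (groups : List Int) (clues : List String) : Bool :=
  if groups.length != clues.length then false
  else
    let gstrs := groups.map PySem.Int.toStr
    let gcount := gstrs.foldl (fun d s => d.insert s (d.getD s 0 + 1))
      (PySem.Dict.empty : PySem.Dict String Int)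
    let ccount := clues.foldl (fun d c => d.insert c (d.getD c 0 + 1))
      (PySem.Dict.empty : PySem.Dict String Int)
    let needed := (gcount.items.map (fun p => max 0 (p.2 - ccount.getD p.1 0))).sum
    decide (needed ≤ ccount.getD "?" 0)

-- ===== PRECONDITION & SPEC =====
def Spec_do_groups_match_clues (groups : List Int) (clues : List String) (out : Bool) : Prop := out = do_groups_match_clues_alt groups clues
instance (groups : List Int) (clues : List String) (out : Bool) : Decidable (Spec_do_groups_match_clues groups clues out) := by unfold Spec_do_groups_match_clues; infer_instance

-- ===== CLAIM (what is proved, stated in full; the proofs are below) =====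
def Claim_equal_do_groups_match_clues : Prop := ∀ (groups : List Int) (clues : List String), Dom_do_groups_match_clues groups clues → Spec_do_groups_match_clues groups clues (do_groups_match_clues groups clues)

-- ===== LEMMAS AND PROOFS =====

-- the deficit of exact clues, as a sum over the distinct group strings
def pvNeed (ms cs : List String) : Int :=
  ∑ s ∈ ms.toFinset, max 0 ((ms.count s : Int) - (cs.count s : Int))

lemma pvNeed_nonneg (ms cs : List String) : 0 ≤ pvNeed ms cs :=
  Finset.sum_nonneg (fun _ _ => le_max_left _ _)

lemma pvDigitChar_isDigit (n : Nat) (h : n < 10) : (Nat.digitChar n).isDigit = true := by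
  interval_cases n <;> decide

lemma pvToDigitsCore_digits : ∀ (fuel n : Nat) (acc : List Char),
    (∀ c ∈ acc, c.isDigit = true) → ∀ c ∈ Nat.toDigitsCore 10 fuel n acc, c.isDigit = true := by
  intro fuel
  induction fuel with
  | zero => intro n acc hacc c hc; simp only [Nat.toDigitsCore] at hc; exact hacc c hc
  | succ f ih =>
    intro n acc hacc c hc
    have hd : (Nat.digitChar (n % 10)).isDigit = true :=
      pvDigitChar_isDigit _ (Nat.mod_lt _ (by norm_num))
    simp only [Nat.toDigitsCore] at hc
    split at hc
    · rcases List.mem_cons.mp hc with rfl | hc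
      · exact hd
      · exact hacc c hc
    · refine ih _ _ ?_ c hc
      intro c' hc'
      rcases List.mem_cons.mp hc' with rfl | hc'
      · exact hd
      · exact hacc c' hc'

lemma pvToStr_ne_qm (n : Int) : PySem.Int.toStr n ≠ "?" := by
  intro h
  have h2 : PySem.Int.toChars n = ['?'] := by
    have h3 := congrArg String.toList h
    rw [PySem.Int.toList_toStr] at h3
    simpa using h3
  unfold PySem.Int.toChars at h2
  split at h2
  · have hhd : '-' = '?' := by injection h2
    exact absurd hhd (by decide)
  · have hmem : '?' ∈ Nat.toDigitsCore 10 (n.toNat + 1) n.toNat [] := by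
      have h3 : Nat.toDigitsCore 10 (n.toNat + 1) n.toNat [] = ['?'] := by
        rw [← Nat.toDigits]; exact h2
      rw [h3]; simp
    have : ('?' : Char).isDigit = true :=
      pvToDigitsCore_digits (n.toNat + 1) n.toNat [] (by simp) '?' hmem
    exact absurd this (by decide)

lemma pvNeed_cons_mem (t : String) (ms cs : List String) (ht : t ∈ cs) :
    pvNeed (t :: ms) cs = pvNeed ms (cs.erase t) := by
  have hc1 : 1 ≤ cs.count t := List.one_le_count_iff.mpr ht
  by_cases hm : t ∈ ms
  · have hfin : (t :: ms).toFinset = ms.toFinset := by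
      simp [List.toFinset_cons, hm]
    unfold pvNeed
    rw [hfin]
    refine Finset.sum_congr rfl ?_
    intro s hs
    by_cases hst : s = t
    · subst hst
      rw [List.count_cons_self, List.count_erase_self, Nat.cast_sub hc1]
      congr 1
      push_cast
      ring
    · rw [List.count_cons_of_ne (Ne.symm hst), List.count_erase_of_ne hst]
  · unfold pvNeed
    rw [List.toFinset_cons, Finset.sum_insert (by simpa using hm)]
    have hterm : max 0 (((t :: ms).count t : Int) - (cs.count t : Int)) = 0 := by
      rw [List.count_cons_self, List.count_eq_zero_of_not_mem hm]
      apply max_eq_left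
      push_cast
      omega
    rw [hterm, zero_add]
    refine Finset.sum_congr rfl ?_
    intro s hs
    have hst : s ≠ t := fun e => hm (e ▸ List.mem_toFinset.mp hs)
    rw [List.count_cons_of_ne (Ne.symm hst), List.count_erase_of_ne hst]

lemma pvNeed_cons_not_mem (t : String) (ms cs : List String) (ht : t ∉ cs) :
    pvNeed (t :: ms) cs = pvNeed ms cs + 1 := by
  have hc0 : cs.count t = 0 := List.count_eq_zero_of_not_mem ht
  by_cases hm : t ∈ ms
  · have hfin : (t :: ms).toFinset = ms.toFinset := by
      simp [List.toFinset_cons, hm]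
    have hmem : t ∈ ms.toFinset := List.mem_toFinset.mpr hm
    unfold pvNeed
    rw [hfin, ← Finset.add_sum_erase _ _ hmem, ← Finset.add_sum_erase _ _ hmem]
    have hsum : ∑ s ∈ ms.toFinset.erase t,
          max 0 (((t :: ms).count s : Int) - (cs.count s : Int))
        = ∑ s ∈ ms.toFinset.erase t,
          max 0 ((ms.count s : Int) - (cs.count s : Int)) := by
      refine Finset.sum_congr rfl ?_
      intro s hs
      rw [List.count_cons_of_ne (Ne.symm (Finset.mem_erase.mp hs).1)]
    rw [hsum, List.count_cons_self, hc0]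
    push_cast
    rw [max_eq_right (by omega), max_eq_right (by omega)]
    ring
  · unfold pvNeed
    rw [List.toFinset_cons, Finset.sum_insert (by simpa using hm)]
    have hterm : max 0 (((t :: ms).count t : Int) - (cs.count t : Int)) = 1 := by
      rw [List.count_cons_self, List.count_eq_zero_of_not_mem hm, hc0]
      norm_num
    rw [hterm]
    have hsum : ∑ s ∈ ms.toFinset,
          max 0 (((t :: ms).count s : Int) - (cs.count s : Int))
        = ∑ s ∈ ms.toFinset,
          max 0 ((ms.count s : Int) - (cs.count s : Int)) := by
      refine Finset.sum_congr rfl ?_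
      intro s hs
      rw [List.count_cons_of_ne (by
        intro e
        exact hm (by rw [e]; exact List.mem_toFinset.mp hs))]
    rw [hsum]
    ring

lemma pvNeed_erase_qm (ms cs : List String) (h : ∀ s ∈ ms, s ≠ "?") :
    pvNeed ms (cs.erase "?") = pvNeed ms cs := by
  unfold pvNeed
  refine Finset.sum_congr rfl ?_
  intro s hs
  rw [List.count_erase_of_ne (h s (List.mem_toFinset.mp hs))]

lemma pvTapaLoop_eq (gs : List Int) : ∀ cs : List String,
    pvTapaLoop gs cs
      = decide (pvNeed (gs.map PySem.Int.toStr) cs ≤ (cs.count "?" : Int)) := by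
  induction gs with
  | nil =>
    intro cs
    have : pvNeed ([] : List String) cs = 0 := by simp [pvNeed]
    simp [pvTapaLoop, this]
  | cons g gs ih =>
    intro cs
    have hq : ("?" : String) ≠ PySem.Int.toStr g := fun e => pvToStr_ne_qm g e.symm
    by_cases h1 : PySem.Int.toStr g ∈ cs
    · rw [show pvTapaLoop (g :: gs) cs = pvTapaLoop gs (cs.erase (PySem.Int.toStr g)) from by
        simp [pvTapaLoop, h1]]
      rw [ih, List.map_cons, pvNeed_cons_mem _ _ _ h1, List.count_erase_of_ne hq]
    · by_cases h2 : ("?" : String) ∈ cs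
      · rw [show pvTapaLoop (g :: gs) cs = pvTapaLoop gs (cs.erase "?") from by
          simp [pvTapaLoop, h1, h2]]
        rw [ih, List.map_cons, pvNeed_cons_not_mem _ _ _ h1,
          pvNeed_erase_qm _ _ (fun s hs => by
            obtain ⟨g', _, rfl⟩ := List.mem_map.mp hs
            exact pvToStr_ne_qm g'),
          List.count_erase_self]
        have h1c : 1 ≤ cs.count "?" := List.one_le_count_iff.mpr h2
        rw [decide_eq_decide]
        omega
      · rw [show pvTapaLoop (g :: gs) cs = false from by simp [pvTapaLoop, h1, h2]]
        rw [List.map_cons, pvNeed_cons_not_mem _ _ _ h1]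
        have hn := pvNeed_nonneg (gs.map PySem.Int.toStr) cs
        have hc0 : cs.count "?" = 0 := List.count_eq_zero_of_not_mem h2
        rw [hc0]
        symm
        rw [decide_eq_false_iff_not]
        push_cast
        omega

lemma pvAlt_eq (groups : List Int) (clues : List String) :
    do_groups_match_clues_alt groups clues
      = if groups.length != clues.length then false
        else decide (pvNeed (groups.map PySem.Int.toStr) clues ≤ (clues.count "?" : Int)) := by
  have hset : (PySem.Set.ofList (groups.map PySem.Int.toStr)).toFinset
      = (groups.map PySem.Int.toStr).toFinset := by
    ext x; simp [PySem.Set.mem_ofList]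
  simp only [do_groups_match_clues_alt, pvNeed,
    PySem.Dict.foldl_insert_getD_add_one_eq_counter, PySem.Dict.items_counter,
    PySem.Dict.getD_counter, List.map_map]
  rw [← List.sum_toFinset _ (PySem.Set.nodup_ofList _), hset]
  rfl

-- ===== VERDICT (by name: the statement is the Claim_ definition above) =====
theorem do_groups_match_clues_spec : Claim_equal_do_groups_match_clues := by
  intro groups clues _
  show do_groups_match_clues groups clues = do_groups_match_clues_alt groups clues
  rw [pvAlt_eq]
  unfold do_groups_match_clues
  by_cases h : groups.length = clues.length
  · simp [h, pvTapaLoop_eq]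
  · simp [h]
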